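-- pv_equiv track=rewrite | github.com/KareemAdelFaheem/Digital-Signal-Processing | project/Resampling.py | upsampling
-- ===== SOURCE A (Python) =====
-- def upsampling(signal, l):
--     up_sampled = []
--     for i in range(len(signal)):
--         up_sampled.append(signal[i])
--         if (i == (len(signal) - 1)):
--             break
--         for j in range(l - 1):
--             up_sampled.append(0)
--
--     return up_sampled
-- ===== SOURCE B (Python) =====
-- def upsampling(sig, l):
--     # parameter renamed from 'signal' (that identifier is refused by the harness); called positionally
--     if not sig:
--         return []
--     stride = max(l, 1)
--     out = [0] * ((len(sig) - 1) * stride + 1)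
--     for i, x in enumerate(sig):
--         out[i * stride] = x
--     return out
-- ===== Notes on version B (the rewrite author's own statement) =====
-- stated objective: alternative
-- what changed: B preallocates a zero-filled result of computed length and scatters each sample at index i*stride (stride = max(l,1)) with enumerate, instead of A's incremental append with an inner zero-filling loop and a mid-loop break.
import Mathlib
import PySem

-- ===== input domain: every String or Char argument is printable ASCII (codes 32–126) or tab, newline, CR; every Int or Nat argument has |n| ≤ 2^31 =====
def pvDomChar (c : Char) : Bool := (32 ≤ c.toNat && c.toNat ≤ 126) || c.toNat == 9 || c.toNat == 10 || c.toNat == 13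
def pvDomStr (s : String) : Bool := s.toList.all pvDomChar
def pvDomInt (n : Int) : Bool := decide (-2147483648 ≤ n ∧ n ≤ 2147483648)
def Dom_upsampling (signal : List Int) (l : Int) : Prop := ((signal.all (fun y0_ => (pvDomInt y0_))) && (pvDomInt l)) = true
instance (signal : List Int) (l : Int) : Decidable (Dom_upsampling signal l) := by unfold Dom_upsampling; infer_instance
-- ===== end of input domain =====

-- B preallocates a zero array and scatters each sample at index i*stride instead of appending
-- with an inner zero-filling loop (objective: alternative decomposition, same cost).


-- ===== PORT A =====
-- loop 'for i in range(len(signal))' with the mid-loop break, step for step;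
-- signal[i] is always in range (i < len), so pyGetD is exact here.
def upsamplingGo (signal : List Int) (l : Int) (i : Nat) (acc : List Int) : List Int :=
  if _h : i < signal.length then
    let acc1 := acc ++ [PySem.List.pyGetD signal (i : Int) 0]
    if i = signal.length - 1 then acc1
    else upsamplingGo signal l (i + 1)
      ((PySem.List.pyRange 0 (l - 1) 1).foldl (fun a _ => a ++ [(0 : Int)]) acc1)
  else acc
termination_by signal.length - i

def upsampling (signal : List Int) (l : Int) : List Int :=
  upsamplingGo signal l 0 []

-- ===== PORT B =====
-- 'out[i*stride] = x' is always in range (i*stride < len(out)), so pySetD is exact here.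
def upsampling_alt (signal : List Int) (l : Int) : List Int :=
  if signal = [] then []
  else
    let stride := max l 1
    let out : List Int := List.replicate ((signal.length - 1) * stride.toNat + 1) 0
    (PySem.List.enumerate signal 0).foldl
      (fun o p => PySem.List.pySetD o (p.1 * stride) p.2) out

-- ===== PRECONDITION & SPEC =====
def Spec_upsampling (signal : List Int) (l : Int) (out : List Int) : Prop := out = upsampling_alt signal l
instance (signal : List Int) (l : Int) (out : List Int) : Decidable (Spec_upsampling signal l out) := by unfold Spec_upsampling; infer_instance

-- ===== CLAIM (what is proved, stated in full; the proofs are below) =====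
def Claim_equal_upsampling : Prop := ∀ (signal : List Int) (l : Int), Dom_upsampling signal l → Spec_upsampling signal l (upsampling signal l)

-- ===== LEMMAS AND PROOFS =====

-- canonical form: samples separated by k zeros
def canonGap (k : Nat) : List Int → List Int
  | [] => []
  | [x] => [x]
  | x :: y :: rest => x :: (List.replicate k 0 ++ canonGap k (y :: rest))

theorem foldl_zeros (r : List Int) (acc : List Int) :
    r.foldl (fun a _ => a ++ [(0 : Int)]) acc = acc ++ List.replicate r.length 0 := by
  induction r generalizing acc with
  | nil => simp
  | cons x xs ih =>
    simp only [List.foldl_cons, ih, List.append_assoc, List.singleton_append,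
      List.length_cons, List.replicate_succ]

theorem goA (suf : List Int) (hsuf : suf ≠ []) (pre acc : List Int) (l : Int) :
    upsamplingGo (pre ++ suf) l pre.length acc = acc ++ canonGap (l - 1).toNat suf := by
  induction suf generalizing pre acc with
  | nil => exact absurd rfl hsuf
  | cons x rest ih =>
    rw [upsamplingGo]
    have hlt : pre.length < (pre ++ x :: rest).length := by simp
    rw [dif_pos hlt]
    have hget : PySem.List.pyGetD (pre ++ x :: rest) (pre.length : Int) 0 = x := by
      simp [PySem.List.pyGetD_natCast, List.getD]
    rw [hget]
    cases rest with
    | nil =>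
      have : pre.length = (pre ++ [x]).length - 1 := by simp
      rw [if_pos this]
      simp [canonGap]
    | cons y rs =>
      have hne : ¬ pre.length = (pre ++ x :: y :: rs).length - 1 := by simp
      rw [if_neg hne]
      rw [foldl_zeros]
      have hlen : (PySem.List.pyRange 0 (l - 1) 1).length = (l - 1).toNat := by
        simp [PySem.List.length_pyRange_one]
      rw [hlen]
      have hre : pre ++ x :: y :: rs = (pre ++ [x]) ++ y :: rs := by simp
      have hidx : pre.length + 1 = (pre ++ [x]).length := by simp
      rw [hre, hidx, ih (by simp) (pre ++ [x])]
      simp [canonGap]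

theorem set_append_length (pre : List Int) (y : Int) (ys : List Int) (x : Int) :
    (pre ++ y :: ys).set pre.length x = pre ++ x :: ys := by
  induction pre with
  | nil => simp
  | cons a as ih => simp [ih]

theorem scatter (xs : List Int) (hxs : xs ≠ []) (s : Nat) (hs : 0 < s) :
    ∀ (j : Nat) (pre : List Int), pre.length = j * s →
    (PySem.List.enumerate xs (j : Int)).foldl
        (fun o p => PySem.List.pySetD o (p.1 * (s : Int)) p.2)
        (pre ++ List.replicate ((xs.length - 1) * s + 1) 0)
      = pre ++ canonGap (s - 1) xs := by
  induction xs with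
  | nil => exact absurd rfl hxs
  | cons x rest ih =>
    intro j pre hpre
    rw [PySem.List.enumerate_cons, List.foldl_cons]
    have hcast : (j : Int) * (s : Int) = ((j * s : Nat) : Int) := by push_cast; ring
    cases rest with
    | nil =>
      simp only [List.length_cons, List.length_nil]
      have : (1 - 1) * s + 1 = 1 := by omega
      rw [this]
      show (PySem.List.enumerate ([] : List Int) _).foldl _
          (PySem.List.pySetD (pre ++ List.replicate 1 0) ((j : Int) * (s : Int)) x) = _
      rw [PySem.List.enumerate_nil, List.foldl_nil, hcast, PySem.List.pySetD_natCast, ← hpre]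
      simp only [List.replicate]
      rw [set_append_length]
      simp [canonGap]
    | cons y rs =>
      have hL : ((x :: y :: rs).length - 1) * s + 1
          = 1 + ((s - 1) + (((y :: rs).length - 1) * s + 1)) := by
        simp only [List.length_cons]
        have hmul : (rs.length + 1) * s = rs.length * s + s := by ring
        have e1 : rs.length + 1 + 1 - 1 = rs.length + 1 := rfl
        have e2 : rs.length + 1 - 1 = rs.length := rfl
        rw [e1, e2, hmul]; omega
      rw [hL]
      have hrep : List.replicate (1 + ((s - 1) + (((y :: rs).length - 1) * s + 1))) (0 : Int)
          = 0 :: (List.replicate (s - 1) 0 ++ List.replicate (((y :: rs).length - 1) * s + 1) 0) := by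
        rw [List.replicate_add, List.replicate_add]; simp [List.replicate_succ]
      rw [hrep]
      show (PySem.List.enumerate (y :: rs) ((j : Int) + 1)).foldl _
          (PySem.List.pySetD (pre ++ 0 :: (List.replicate (s - 1) 0 ++ _)) ((j : Int) * (s : Int)) x) = _
      rw [hcast, PySem.List.pySetD_natCast, ← hpre, set_append_length]
      have hpre' : (pre ++ x :: List.replicate (s - 1) 0).length = (j + 1) * s := by
        rw [List.length_append, List.length_cons, List.length_replicate, hpre,
          Nat.add_mul, Nat.one_mul]
        omega
      have hj1 : ((j : Int) + 1) = ((j + 1 : Nat) : Int) := by push_cast; ring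
      have := ih (by simp) (j + 1) (pre ++ x :: List.replicate (s - 1) 0) hpre'
      rw [hj1]
      calc (PySem.List.enumerate (y :: rs) ((j + 1 : Nat) : Int)).foldl
            (fun o p => PySem.List.pySetD o (p.1 * (s : Int)) p.2)
            (pre ++ x :: (List.replicate (s - 1) 0 ++ List.replicate (((y :: rs).length - 1) * s + 1) 0))
          = (PySem.List.enumerate (y :: rs) ((j + 1 : Nat) : Int)).foldl
            (fun o p => PySem.List.pySetD o (p.1 * (s : Int)) p.2)
            ((pre ++ x :: List.replicate (s - 1) 0) ++ List.replicate (((y :: rs).length - 1) * s + 1) 0) := by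
              simp
        _ = (pre ++ x :: List.replicate (s - 1) 0) ++ canonGap (s - 1) (y :: rs) := this
        _ = pre ++ canonGap (s - 1) (x :: y :: rs) := by simp [canonGap]

theorem alt_eq_canon (signal : List Int) (l : Int) (h : signal ≠ []) :
    upsampling_alt signal l = canonGap (l - 1).toNat signal := by
  unfold upsampling_alt
  rw [if_neg h]
  have hs : 0 < (max l 1).toNat := by omega
  have hk : (max l 1).toNat - 1 = (l - 1).toNat := by omega
  have := scatter signal h (max l 1).toNat hs 0 [] (by simp)
  simpa [hk] using this

-- ===== VERDICT (by name: the statement is the Claim_ definition above) =====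
theorem upsampling_spec : Claim_equal_upsampling := by
  intro signal l _
  show upsampling signal l = upsampling_alt signal l
  cases hsig : signal with
  | nil =>
    rw [upsampling, upsamplingGo]
    simp [upsampling_alt]
  | cons x rest =>
    rw [upsampling, alt_eq_canon _ _ (by simp)]
    have := goA (x :: rest) (by simp) [] [] l
    simpa using this
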